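-- pv_equiv track=rewrite | github.com/lewconway/quotate | quotate.py | no2family
-- ===== SOURCE A (Python) =====
-- def no2family(no):
--     space_group_to_lattice = {
--             'cubic':        range(195, 231),
--             'hexagonal':    range(168, 195),
--             'trigonal':     range(143, 168),
--             'tetragonal':   range(75, 143),
--             'orthorhombic': range(16, 75),
--             'monoclinic':   range(3, 16),
--             'triclinic':    range(1, 3),
--     }
--     for i in space_group_to_lattice.keys():
--         if no in space_group_to_lattice[i]:
--             return i
-- ===== SOURCE B (Python) =====
-- _FAMILIES = (
--     ('cubic', 195, 231),
--     ('hexagonal', 168, 195),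
--     ('trigonal', 143, 168),
--     ('tetragonal', 75, 143),
--     ('orthorhombic', 16, 75),
--     ('monoclinic', 3, 16),
--     ('triclinic', 1, 3),
-- )
-- # Flat lookup table built once: every space-group number 1..230 -> family name.
-- _TABLE = {n: fam for fam, lo, hi in _FAMILIES for n in range(lo, hi)}
--
-- def no2family(no):
--     return _TABLE.get(no)
-- ===== Notes on version B (the rewrite author's own statement) =====
-- stated objective: idiomatic
-- what changed: Replaced the per-call scan over seven range objects by a flat dict mapping every space-group number 1..230 to its family, built once at module load, so a call is a single dict lookup.
import Mathlib
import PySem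

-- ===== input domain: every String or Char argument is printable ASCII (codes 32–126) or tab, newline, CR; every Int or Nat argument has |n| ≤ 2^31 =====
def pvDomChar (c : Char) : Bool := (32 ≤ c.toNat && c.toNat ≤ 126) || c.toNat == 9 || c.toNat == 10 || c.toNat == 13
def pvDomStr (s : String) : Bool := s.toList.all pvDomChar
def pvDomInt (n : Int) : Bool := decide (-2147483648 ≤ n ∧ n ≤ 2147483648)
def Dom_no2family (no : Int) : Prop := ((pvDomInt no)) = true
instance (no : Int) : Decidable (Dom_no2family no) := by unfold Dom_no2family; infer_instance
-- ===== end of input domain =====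

-- B replaces A's per-call scan over seven ranges by a flat precomputed table (one lookup per call); idiomatic, same results.


-- ===== PORT A =====
-- A: scan the seven (family, range) entries in insertion order; return the first family whose range contains no.
-- 'no in range(lo, hi)' for step-1 ranges is exactly lo ≤ no < hi.
def no2familyLoop (no : Int) : List (String × Int × Int) → Option String
  | [] => none
  | (name, lo, hi) :: rest =>
      if lo ≤ no ∧ no < hi then some name else no2familyLoop no rest

def no2family (no : Int) : Option String :=
  let space_group_to_lattice : List (String × Int × Int) :=
    [("cubic", 195, 231), ("hexagonal", 168, 195), ("trigonal", 143, 168),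
     ("tetragonal", 75, 143), ("orthorhombic", 16, 75), ("monoclinic", 3, 16),
     ("triclinic", 1, 3)]
  no2familyLoop no space_group_to_lattice

-- ===== PORT B =====
-- B: a flat table built once (dict comprehension over the seven ranges, fresh keys -> append), then one lookup.
def no2familyFamilies : List (String × Int × Int) :=
  [("cubic", 195, 231), ("hexagonal", 168, 195), ("trigonal", 143, 168),
   ("tetragonal", 75, 143), ("orthorhombic", 16, 75), ("monoclinic", 3, 16),
   ("triclinic", 1, 3)]

def no2familyTable : PySem.Dict Int String :=
  (no2familyFamilies.flatMap fun p =>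
    (PySem.List.pyRange p.2.1 p.2.2 1).map fun n => (n, p.1)).foldl
    (fun d kv => d.insert kv.1 kv.2) PySem.Dict.empty

def no2family_alt (no : Int) : Option String :=
  no2familyTable.get? no


-- ===== PRECONDITION & SPEC =====
def Spec_no2family (no : Int) (out : Option String) : Prop := out = no2family_alt no
instance (no : Int) (out : Option String) : Decidable (Spec_no2family no out) := by unfold Spec_no2family; infer_instance

-- ===== CLAIM (what is proved, stated in full; the proofs are below) =====
def Claim_equal_no2family : Prop := ∀ (no : Int), Dom_no2family no → Spec_no2family no (no2family no)


-- ===== LEMMAS AND PROOFS =====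
set_option maxRecDepth 4000 in
theorem no2family_small : ∀ m < 231, no2family (m : Nat) = no2family_alt (m : Nat) := by
  decide

set_option maxRecDepth 4000 in
theorem no2family_keys_bounded :
    ∀ p ∈ no2familyTable.items, 1 ≤ p.1 ∧ p.1 < 231 := by decide

theorem alt_none_of_out (no : Int) (h : no < 1 ∨ 231 ≤ no) : no2family_alt no = none := by
  unfold no2family_alt
  rw [PySem.Dict.get?_eq_none_iff_not_mem_keys]
  intro hk
  simp only [PySem.Dict.keys, List.mem_map] at hk
  obtain ⟨p, hp, hpk⟩ := hk
  have := no2family_keys_bounded p hp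
  omega

-- ===== VERDICT (by name: the statement is the Claim_ definition above) =====
theorem no2family_spec : Claim_equal_no2family := by
  intro no _
  unfold Spec_no2family
  by_cases h : 1 ≤ no ∧ no < 231
  · have hm : no = (no.toNat : Int) := (Int.toNat_of_nonneg (by omega)).symm
    rw [hm]
    exact no2family_small no.toNat (by omega)
  · rw [alt_none_of_out no (by omega)]
    simp only [no2family, no2familyLoop]
    split_ifs with h1 h2 h3 h4 h5 h6 h7 <;> first | rfl | omega
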